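-- pv_equiv track=rewrite | github.com/AWT-01-API/katas | src/Angelica/kata_bank/Convertor.py | get_code_matrix_list
-- ===== SOURCE A (Python) =====
-- def get_code_matrix_list(codelineslist):
--     matrix_list = [[], [], [], [], [], [], [], [], [], ]
--     lastindex = 0
--     for index in range(0, len(matrix_list)):
--         nextindex = lastindex + 3
--         for line in codelineslist:
--             line_to_split = list(line)
--             matrix_l = line_to_split[lastindex:nextindex]
--             if len(matrix_l) < 3 :
--                 matrix_l = [' ', ' ', ' ']
--             matrix_list[index].append(matrix_l)
--         lastindex = nextindex
--     return matrix_list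
-- ===== SOURCE B (Python) =====
-- def get_code_matrix_list(codelineslist):
--     # Row-major first: compute each line's row of nine 3-char chunks once,
--     # then transpose the rows into the nine column lists.
--     rows = []
--     for line in codelineslist:
--         chars = list(line)
--         row = []
--         for k in range(9):
--             chunk = chars[3 * k:3 * k + 3]
--             row.append(chunk if len(chunk) >= 3 else [' ', ' ', ' '])
--         rows.append(row)
--     return [[row[k] for row in rows] for k in range(9)]
-- ===== Notes on version B (the rewrite author's own statement) =====
-- stated objective: alternative
-- what changed: B is row-major then transpose: it builds one row of nine chunks per line (computing list(line) once) and then transposes the list of rows into the nine column lists, instead of A's direct column-major construction with nine passes over all lines.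
import Mathlib
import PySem

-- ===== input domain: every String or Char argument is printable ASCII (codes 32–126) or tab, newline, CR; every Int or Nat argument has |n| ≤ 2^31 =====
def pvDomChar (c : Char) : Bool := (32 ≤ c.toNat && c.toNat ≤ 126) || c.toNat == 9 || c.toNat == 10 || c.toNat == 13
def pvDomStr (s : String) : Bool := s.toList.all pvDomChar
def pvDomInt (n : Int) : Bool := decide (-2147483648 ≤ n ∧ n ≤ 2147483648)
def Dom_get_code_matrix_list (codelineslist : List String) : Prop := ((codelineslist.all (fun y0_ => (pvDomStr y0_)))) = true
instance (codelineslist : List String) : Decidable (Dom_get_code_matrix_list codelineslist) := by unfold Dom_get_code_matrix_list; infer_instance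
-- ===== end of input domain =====

-- B builds each line's row of nine chunks once and transposes the rows into columns,
-- instead of A's column-major construction with nine passes over all lines (objective: alternative).


-- ===== PORT A =====
-- literal transliteration: outer loop over range(0, 9) carrying (matrix_list, lastindex),
-- inner loop over codelineslist appending each slice to matrix_list[index]
-- (index comes from range(0,9) so it is nonnegative: .toNat is exact here)
def get_code_matrix_list (codelineslist : List String) : List (List (List String)) :=
  let matrix_list : List (List (List String)) := [[], [], [], [], [], [], [], [], []]
  let res := (PySem.List.pyRange 0 (matrix_list.length) 1).foldl
    (fun (st : List (List (List String)) × Int) index =>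
      let nextindex := st.2 + 3
      let m := codelineslist.foldl (fun m line =>
          let line_to_split := line.toList.map (fun c => String.ofList [c])
          let matrix_l := PySem.List.slice line_to_split (some st.2) (some nextindex)
          let matrix_l := if matrix_l.length < 3 then [" ", " ", " "] else matrix_l
          m.set index.toNat (m.getD index.toNat [] ++ [matrix_l])) st.1
      (m, nextindex))
    (matrix_list, 0)
  res.1

-- ===== PORT B =====
-- literal transliteration of Source B: first loop builds rows (chars = list(line) once per line,
-- append-loop over range(9) building the row), then the transposing double comprehension.
-- row[k] is ported as (pyGet? row k).getD []: k ∈ 0..8 and every row has 9 entries, so the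
-- index is always in range and the port is exact (the default is never taken).
def get_code_matrix_list_alt (codelineslist : List String) : List (List (List String)) :=
  let rows := codelineslist.foldl (fun rows line =>
      let chars := line.toList.map (fun c => String.ofList [c])
      let row := (PySem.List.pyRange 0 9 1).foldl (fun row k =>
          let chunk := PySem.List.slice chars (some (3 * k)) (some (3 * k + 3))
          row ++ [if chunk.length ≥ 3 then chunk else [" ", " ", " "]]) []
      rows ++ [row]) []
  (PySem.List.pyRange 0 9 1).map (fun k => rows.map (fun row => (PySem.List.pyGet? row k).getD []))

-- ===== PRECONDITION & SPEC =====
def Spec_get_code_matrix_list (codelineslist : List String) (out : List (List (List String))) : Prop := out = get_code_matrix_list_alt codelineslist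
instance (codelineslist : List String) (out : List (List (List String))) : Decidable (Spec_get_code_matrix_list codelineslist out) := by unfold Spec_get_code_matrix_list; infer_instance

-- ===== CLAIM (what is proved, stated in full; the proofs are below) =====
def Claim_equal_get_code_matrix_list : Prop := ∀ (codelineslist : List String), Dom_get_code_matrix_list codelineslist → Spec_get_code_matrix_list codelineslist (get_code_matrix_list codelineslist)

-- ===== LEMMAS AND PROOFS =====

-- the chunk a line contributes to the column starting at character a
def pvChunk (line : String) (a : Int) : List String :=
  let matrix_l := PySem.List.slice (line.toList.map (fun c => String.ofList [c])) (some a) (some (a + 3))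
  if matrix_l.length < 3 then [" ", " ", " "] else matrix_l

-- the common characterisation both ports are reduced to
def pvCols (lines : List String) : List (List (List String)) :=
  [lines.map (fun l => pvChunk l 0), lines.map (fun l => pvChunk l 3), lines.map (fun l => pvChunk l 6),
   lines.map (fun l => pvChunk l 9), lines.map (fun l => pvChunk l 12), lines.map (fun l => pvChunk l 15),
   lines.map (fun l => pvChunk l 18), lines.map (fun l => pvChunk l 21), lines.map (fun l => pvChunk l 24)]

theorem pv_set_getD_self (m : List (List (List String))) (k : Nat) :
    m.set k (m.getD k []) = m := by
  by_cases h : k < m.length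
  · rw [List.getD_eq_getElem m [] h, List.set_getElem_self]
  · exact List.set_eq_of_length_le (by omega)

-- A's inner loop: repeatedly appending to entry k of the matrix
theorem pv_foldl_set_append (lines : List String) (k : Nat) (g : String → List String) :
    ∀ m : List (List (List String)),
      lines.foldl (fun m line => m.set k (m.getD k [] ++ [g line])) m
        = m.set k (m.getD k [] ++ lines.map g) := by
  induction lines with
  | nil =>
      intro m
      simp only [List.foldl_nil, List.map_nil, List.append_nil]
      exact (pv_set_getD_self m k).symm
  | cons l ls ih =>
      intro m
      simp only [List.foldl_cons, List.map_cons, ih]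
      by_cases h : k < m.length
      · rw [List.set_set, List.getD_eq_getElem _ [] (by simpa using h),
            List.getElem_set_self, List.append_assoc]
        simp
      · simp [List.set_eq_of_length_le (l := m) (show m.length ≤ k by omega)]

theorem pv_a_cols (lines : List String) : get_code_matrix_list lines = pvCols lines := by
  rw [get_code_matrix_list]
  rw [show PySem.List.pyRange 0 ([[], [], [], [], [], [], [], [], []] : List (List (List String))).length 1
        = [0, 1, 2, 3, 4, 5, 6, 7, 8] from by decide]
  simp only [List.foldl_cons, List.foldl_nil, pv_foldl_set_append]
  rfl

-- B's append-loops
theorem pv_foldl_append_map {α β : Type} (f : α → β) (xs : List α) :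
    ∀ acc : List β, xs.foldl (fun a x => a ++ [f x]) acc = acc ++ xs.map f := by
  induction xs with
  | nil => intro acc; simp
  | cons x xs ih => intro acc; simp [ih]

theorem pv_ite_pad (c p : List String) :
    (if c.length ≥ 3 then c else p) = (if c.length < 3 then p else c) := by
  by_cases h : c.length < 3 <;> simp [h]

-- evaluating Python row[k] on a literal 9-element row
theorem pv_get_lit (i : Int) (hi : 0 ≤ i) (h : i.toNat < 9) (x0 x1 x2 x3 x4 x5 x6 x7 x8 : List String) (d : List String) :
    (PySem.List.pyGet? [x0, x1, x2, x3, x4, x5, x6, x7, x8] i).getD d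
      = [x0, x1, x2, x3, x4, x5, x6, x7, x8].getD i.toNat d := by
  have h9 : i < 9 := by omega
  rw [List.getD_eq_getElem _ _ (show i.toNat < ([x0, x1, x2, x3, x4, x5, x6, x7, x8] : List (List String)).length by simpa using h)]
  simp [PySem.List.pyGet?, PySem.List.pyIdx?, hi, h9]

theorem pv_b_cols (lines : List String) : get_code_matrix_list_alt lines = pvCols lines := by
  rw [get_code_matrix_list_alt]
  have hrows :
      lines.foldl (fun rows line =>
        let chars := line.toList.map (fun c => String.ofList [c])
        let row := (PySem.List.pyRange 0 9 1).foldl (fun row k =>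
            let chunk := PySem.List.slice chars (some (3 * k)) (some (3 * k + 3))
            row ++ [if chunk.length ≥ 3 then chunk else [" ", " ", " "]]) []
        rows ++ [row]) []
      = lines.map (fun line =>
          [pvChunk line 0, pvChunk line 3, pvChunk line 6, pvChunk line 9, pvChunk line 12,
           pvChunk line 15, pvChunk line 18, pvChunk line 21, pvChunk line 24]) := by
    rw [pv_foldl_append_map (f := fun line =>
      (PySem.List.pyRange 0 9 1).foldl (fun row k =>
          let chunk := PySem.List.slice (line.toList.map (fun c => String.ofList [c]))
            (some (3 * k)) (some (3 * k + 3))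
          row ++ [if chunk.length ≥ 3 then chunk else [" ", " ", " "]]) []) lines []]
    simp only [List.nil_append]
    refine List.map_congr_left (fun line _ => ?_)
    rw [show PySem.List.pyRange 0 9 1 = [0, 1, 2, 3, 4, 5, 6, 7, 8] from by decide]
    simp only [List.foldl_cons, List.foldl_nil, List.nil_append]
    simp only [pv_ite_pad]
    norm_num [pvChunk]
  rw [hrows]
  rw [show PySem.List.pyRange 0 9 1 = [0, 1, 2, 3, 4, 5, 6, 7, 8] from by decide]
  simp only [List.map_cons, List.map_nil, List.map_map, Function.comp_def,
    pv_get_lit 0 (by decide) (by decide), pv_get_lit 1 (by decide) (by decide),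
    pv_get_lit 2 (by decide) (by decide), pv_get_lit 3 (by decide) (by decide),
    pv_get_lit 4 (by decide) (by decide), pv_get_lit 5 (by decide) (by decide),
    pv_get_lit 6 (by decide) (by decide), pv_get_lit 7 (by decide) (by decide),
    pv_get_lit 8 (by decide) (by decide)]
  rfl

-- ===== VERDICT (by name: the statement is the Claim_ definition above) =====
theorem get_code_matrix_list_spec : Claim_equal_get_code_matrix_list := by
  intro lines _
  show get_code_matrix_list lines = get_code_matrix_list_alt lines
  rw [pv_a_cols, pv_b_cols]
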